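-- pv_equiv track=rewrite | github.com/stornes/basketball-ai | scripts/fetch_game.py | _parse_quarter_scores
-- ===== SOURCE A (Python) =====
-- def _parse_quarter_scores(incidents: dict) -> tuple[list[int], list[int]]:
--     """Extract cumulative quarter scores from match incidents.
--
--     Returns (home_cumulative, away_cumulative).
--     """
--     period_results = incidents.get("matchPeriodResults", [])
--     # Sort by partialResultTypeId to get Q1, Q2, Q3, Q4, OT... in order
--     period_results.sort(key=lambda x: x.get("partialResultTypeId", 0))
--
--     home_cum = []
--     away_cum = []
--     home_total = 0
--     away_total = 0
--     for pr in period_results: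
--         home_total += pr.get("homeGoals", 0)
--         away_total += pr.get("awayGoals", 0)
--         home_cum.append(home_total)
--         away_cum.append(away_total)
--     return home_cum, away_cum
-- ===== SOURCE B (Python) =====
-- def _parse_quarter_scores(incidents: dict) -> tuple[list[int], list[int]]:
--     """Extract cumulative quarter scores from match incidents.
--
--     Returns (home_cumulative, away_cumulative).
--     """
--     period_results = incidents.get("matchPeriodResults", [])
--     period_results.sort(key=lambda x: x.get("partialResultTypeId", 0))
--     # Each cumulative entry is computed independently as the sum of a prefix slice:
--     # no running totals are maintained.
--     home_cum = [
--         sum(pr.get("homeGoals", 0) for pr in period_results[: i + 1])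
--         for i in range(len(period_results))
--     ]
--     away_cum = [
--         sum(pr.get("awayGoals", 0) for pr in period_results[: i + 1])
--         for i in range(len(period_results))
--     ]
--     return home_cum, away_cum
-- ===== Notes on version B (the rewrite author's own statement) =====
-- stated objective: alternative
-- what changed: A's single loop carrying two running totals is replaced by per-index prefix-slice sums: each cumulative entry i is recomputed independently as sum(goals over period_results[:i+1]), trading the accumulator state for stateless nested passes.
import Mathlib
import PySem

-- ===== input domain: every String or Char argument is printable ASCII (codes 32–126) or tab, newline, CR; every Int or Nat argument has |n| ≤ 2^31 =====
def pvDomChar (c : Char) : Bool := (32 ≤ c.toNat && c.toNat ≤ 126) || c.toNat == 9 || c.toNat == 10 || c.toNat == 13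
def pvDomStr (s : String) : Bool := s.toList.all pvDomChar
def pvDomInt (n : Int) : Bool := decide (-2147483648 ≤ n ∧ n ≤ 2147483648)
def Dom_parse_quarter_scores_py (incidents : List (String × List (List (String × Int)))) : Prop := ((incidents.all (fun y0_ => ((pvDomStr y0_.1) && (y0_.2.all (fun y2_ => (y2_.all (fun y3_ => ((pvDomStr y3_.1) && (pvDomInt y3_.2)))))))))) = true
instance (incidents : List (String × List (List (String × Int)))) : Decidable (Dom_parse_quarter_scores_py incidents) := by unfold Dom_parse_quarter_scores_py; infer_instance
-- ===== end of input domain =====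

-- B replaces A's single running-total loop by independent per-index prefix-slice sums
-- (objective: alternative). Both A and B sort the caller's list in place;
-- the equivalence proved here is about the return value.


-- ===== PORT A =====
-- pr.get(k, dflt) on an inner dict (association list, first match)
def pqsGetD (pr : List (String × Int)) (k : String) (dflt : Int) : Int :=
  PySem.Dict.getD (PySem.Dict.mk pr) k dflt

def parse_quarter_scores_py (incidents : List (String × List (List (String × Int)))) : List Int × List Int :=
  let period_results := PySem.Dict.getD (PySem.Dict.mk incidents) "matchPeriodResults" []
  let period_results := PySem.List.sorted period_results (fun x => pqsGetD x "partialResultTypeId" 0) false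
  let st := period_results.foldl
    (fun (st : (List Int × List Int) × (Int × Int)) pr =>
      let home_total := st.2.1 + pqsGetD pr "homeGoals" 0
      let away_total := st.2.2 + pqsGetD pr "awayGoals" 0
      ((st.1.1 ++ [home_total], st.1.2 ++ [away_total]), (home_total, away_total)))
    (([], []), (0, 0))
  (st.1.1, st.1.2)

-- ===== PORT B =====
-- each cumulative entry i is the sum over the prefix slice period_results[: i + 1]
def parse_quarter_scores_py_alt (incidents : List (String × List (List (String × Int)))) : List Int × List Int :=
  let period_results := PySem.Dict.getD (PySem.Dict.mk incidents) "matchPeriodResults" []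
  let period_results := PySem.List.sorted period_results (fun x => pqsGetD x "partialResultTypeId" 0) false
  let n : Int := period_results.length
  let home_cum := (PySem.List.pyRange 0 n 1).map (fun i =>
      ((PySem.List.slice period_results none (some (i + 1))).map
        (fun pr => pqsGetD pr "homeGoals" 0)).sum)
  let away_cum := (PySem.List.pyRange 0 n 1).map (fun i =>
      ((PySem.List.slice period_results none (some (i + 1))).map
        (fun pr => pqsGetD pr "awayGoals" 0)).sum)
  (home_cum, away_cum)

-- ===== PRECONDITION & SPEC =====
def Spec_parse_quarter_scores_py (incidents : List (String × List (List (String × Int)))) (out : List Int × List Int) : Prop := out = parse_quarter_scores_py_alt incidents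
instance (incidents : List (String × List (List (String × Int)))) (out : List Int × List Int) : Decidable (Spec_parse_quarter_scores_py incidents out) := by unfold Spec_parse_quarter_scores_py; infer_instance

-- ===== CLAIM =====
def Claim_equal_parse_quarter_scores_py : Prop := ∀ (incidents : List (String × List (List (String × Int)))), Dom_parse_quarter_scores_py incidents → Spec_parse_quarter_scores_py incidents (parse_quarter_scores_py incidents)

-- ===== LEMMAS AND PROOFS =====

-- proof-side helper: running-total prefix sums (what A's fold accumulates)
def pqsAccum (t : Int) : List Int → List Int
  | [] => []
  | x :: xs => (t + x) :: pqsAccum (t + x) xs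

-- A's fold over any list, started at totals (ht, at) with prefixes (hc, ac), produces
-- those prefixes followed by the running-total prefix sums of the two goal streams.
theorem pqs_fold_eq_accum (l : List (List (String × Int))) :
    ∀ (hc ac : List Int) (ht at_ : Int),
    (l.foldl
      (fun (st : (List Int × List Int) × (Int × Int)) pr =>
        let home_total := st.2.1 + pqsGetD pr "homeGoals" 0
        let away_total := st.2.2 + pqsGetD pr "awayGoals" 0
        ((st.1.1 ++ [home_total], st.1.2 ++ [away_total]), (home_total, away_total)))
      ((hc, ac), (ht, at_))).1
    = (hc ++ pqsAccum ht (l.map (fun pr => pqsGetD pr "homeGoals" 0)),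
       ac ++ pqsAccum at_ (l.map (fun pr => pqsGetD pr "awayGoals" 0))) := by
  induction l with
  | nil => intro hc ac ht at_; simp [pqsAccum]
  | cons pr tl ih =>
    intro hc ac ht at_
    simp only [List.foldl_cons, List.map_cons, pqsAccum]
    rw [ih]
    simp

-- running-total prefix sums ARE the per-index sums of prefixes
theorem pqsAccum_eq_map_range (xs : List Int) :
    ∀ (t : Int), pqsAccum t xs
      = (List.range xs.length).map (fun k => t + (xs.take (k + 1)).sum) := by
  induction xs with
  | nil => intro t; simp [pqsAccum]
  | cons x tl ih =>
    intro t
    simp only [pqsAccum, List.length_cons, List.range_succ_eq_map, List.map_cons,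
      List.map_map]
    rw [ih (t + x)]
    refine List.cons_eq_cons.mpr ⟨by simp, ?_⟩
    apply List.map_congr_left
    intro k _
    simp [List.take_succ_cons, add_assoc]

-- ===== VERDICT =====
theorem parse_quarter_scores_py_spec : Claim_equal_parse_quarter_scores_py := by
  intro incidents _
  unfold Spec_parse_quarter_scores_py parse_quarter_scores_py parse_quarter_scores_py_alt
  simp only [pqs_fold_eq_accum, List.nil_append]
  set l := PySem.List.sorted
      (PySem.Dict.getD (PySem.Dict.mk incidents) "matchPeriodResults" [])
      (fun x => pqsGetD x "partialResultTypeId" 0) false with hl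
  rw [pqsAccum_eq_map_range, pqsAccum_eq_map_range,
      PySem.List.pyRange_one 0 (l.length : Int)]
  simp only [List.map_map, List.length_map, Int.sub_zero, Int.toNat_natCast]
  refine congrArg₂ Prod.mk ?_ ?_ <;>
  · apply List.map_congr_left
    intro k hk
    simp only [List.mem_range] at hk
    simp only [Function.comp_apply]
    rw [show ((0 : Int) + (k : Int) + 1) = ((k + 1 : Nat) : Int) by push_cast; ring,
        PySem.List.slice_to_natCast]
    simp [List.map_take]
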